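-- pv_equiv track=rewrite | github.com/timwangmusic/Euler | poker/utils.py | is_arithmetic_progression
-- ===== SOURCE A (Python) =====
-- from typing import List
--
-- def is_arithmetic_progression(nums: List[int], common_diff: int) -> bool:
--     """An arithmetic progression sequence should have length of at least 3"""
--     if common_diff == 0 or len(nums) < 3:
--         return False
--
--     prev = nums[0]
--     for num in nums[1:]:
--         if num - prev != common_diff:
--             return False
--         prev = num
--     return True
-- ===== SOURCE B (Python) =====
-- def is_arithmetic_progression(nums, common_diff):
--     """An arithmetic progression sequence should have length of at least 3"""
--     if common_diff == 0 or len(nums) < 3: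
--         return False
--     return all(n == nums[0] + i * common_diff for i, n in enumerate(nums))
-- ===== Notes on version B (the rewrite author's own statement) =====
-- stated objective: alternative
-- what changed: Replaces the stateful prev-accumulator loop comparing consecutive differences with a stateless closed-form check that each element equals nums[0] + i*common_diff at its absolute index.
import Mathlib
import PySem

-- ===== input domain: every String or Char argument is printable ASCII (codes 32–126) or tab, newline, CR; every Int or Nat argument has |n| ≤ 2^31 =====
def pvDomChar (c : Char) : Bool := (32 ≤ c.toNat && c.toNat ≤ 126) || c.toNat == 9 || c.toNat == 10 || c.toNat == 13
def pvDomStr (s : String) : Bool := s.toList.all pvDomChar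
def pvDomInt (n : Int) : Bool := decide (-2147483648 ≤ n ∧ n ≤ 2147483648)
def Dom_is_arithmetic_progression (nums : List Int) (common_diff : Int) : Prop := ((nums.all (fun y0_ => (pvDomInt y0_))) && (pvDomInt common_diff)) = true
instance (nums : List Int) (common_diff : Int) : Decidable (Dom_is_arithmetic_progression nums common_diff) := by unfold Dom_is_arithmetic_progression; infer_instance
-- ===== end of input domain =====

-- B replaces A's prev-accumulator consecutive-difference loop with a stateless
-- closed-form check of each element against nums[0] + i*common_diff (alternative decomposition).
-- ===== PORT A =====
-- the 'for num in nums[1:]' loop with its running prev accumulator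
def apLoop (prev : Int) (rest : List Int) (common_diff : Int) : Bool :=
  match rest with
  | [] => true
  | num :: t => if num - prev ≠ common_diff then false else apLoop num t common_diff

def is_arithmetic_progression (nums : List Int) (common_diff : Int) : Bool :=
  if common_diff == 0 || nums.length < 3 then false
  else
    match nums with
    | [] => false  -- unreachable: the guard ensures nums.length ≥ 3
    | h :: t => apLoop h t common_diff

-- ===== PORT B =====
def is_arithmetic_progression_alt (nums : List Int) (common_diff : Int) : Bool :=
  if common_diff == 0 || nums.length < 3 then false
  else
    match nums with
    | [] => false  -- unreachable: the guard ensures nums.length ≥ 3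
    | h :: _ => nums.zipIdx.all (fun p => p.1 == h + (p.2 : Int) * common_diff)

-- ===== PRECONDITION & SPEC =====
def Spec_is_arithmetic_progression (nums : List Int) (common_diff : Int) (out : Bool) : Prop := out = is_arithmetic_progression_alt nums common_diff
instance (nums : List Int) (common_diff : Int) (out : Bool) : Decidable (Spec_is_arithmetic_progression nums common_diff out) := by unfold Spec_is_arithmetic_progression; infer_instance

-- ===== CLAIM (what is proved, stated in full; the proofs are below) =====
def Claim_equal_is_arithmetic_progression : Prop := ∀ (nums : List Int) (common_diff : Int), Dom_is_arithmetic_progression nums common_diff → Spec_is_arithmetic_progression nums common_diff (is_arithmetic_progression nums common_diff)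

-- ===== LEMMAS AND PROOFS =====

-- ===== VERDICT (by name: the statement is the Claim_ definition above) =====
lemma apLoop_eq_zipIdx (t : List Int) (h prev d : Int) (k : Nat)
    (hp : prev = h + (k : Int) * d) :
    apLoop prev t d = (t.zipIdx (k+1)).all (fun p => p.1 == h + (p.2 : Int) * d) := by
  induction t generalizing prev k with
  | nil => simp [apLoop]
  | cons n t ih =>
    simp only [apLoop, List.zipIdx, List.all_cons]
    by_cases hne : n - prev = d
    · have hn : n = h + ((k+1 : Nat) : Int) * d := by push_cast; push_cast at hp; linarith
      rw [if_neg (by simp [hne])]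
      rw [ih n (k+1) hn]
      simp [hn]
    · rw [if_pos hne]
      have : ¬ (n = h + ((k+1 : Nat) : Int) * d) := by
        intro hc; apply hne; push_cast at hc hp ⊢; linarith
      have this' : ¬ n = h + ((k : Int) + 1) * d := by push_cast at this; exact this
      simp [this']

theorem is_arithmetic_progression_spec : Claim_equal_is_arithmetic_progression := by
  intro nums d _
  unfold Spec_is_arithmetic_progression is_arithmetic_progression is_arithmetic_progression_alt
  split
  · rfl
  · match nums with
    | [] => rfl
    | h :: t =>
      simp only [List.zipIdx, List.all_cons]
      rw [apLoop_eq_zipIdx t h h d 0 (by ring)]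
      simp
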